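-- pv_equiv track=rewrite | github.com/Freshield/LEARN_ACM_Challenge | carl_algorithm/a71_strstr.py | get_next_easy
-- ===== SOURCE A (Python) =====
-- def get_next_easy(needle):
--     """
--     使用双指针法
--     1. 初始化next数组，left，right
--     2. 遍历needle的区间
--     3. 获取此区间前后缀最长长度
--     """
--     # 1. 初始化next数组，left，right
--     next_list = [0] * len(needle)
--     # 2. 遍历needle的区间
--     for i in range(len(needle)):
--         # 3. 获取此区间前后缀最长长度
--         left, right, count = 0, i, 0
--         # 奇数时共同的部分不算
--         while left < right:
--             if needle[left] != needle[right]: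
--                 break
--             next_list[i] += 1
--             left += 1
--             right -= 1
--
--     return next_list
-- ===== SOURCE B (Python) =====
-- def get_next_easy(needle):
--     # Z-algorithm: next[i] = lcp(needle, reverse of needle[:i+1]) capped at (i+1)//2.
--     # Build s = needle + sep + reversed(needle); one left-to-right pass with a
--     # z-box (l, r) computes z[k] = lcp(s, s[k:]) for all k in O(n); the answer
--     # for prefix i sits at position 2*n - i, capped by arithmetic min.
--     n = len(needle)
--     s = needle + "\x00" + needle[::-1]
--     m = len(s)
--     z = [0] * m
--     l = r = 0
--     for k in range(1, m):
--         zk = 0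
--         if k < r:
--             zk = min(r - k, z[k - l])
--         while k + zk < m and s[zk] == s[k + zk]:
--             zk += 1
--         z[k] = zk
--         if k + zk > r:
--             l, r = k, k + zk
--     return [min(z[2 * n - i], (i + 1) // 2) for i in range(n)]
-- ===== Notes on version B (the rewrite author's own statement) =====
-- stated objective: faster
-- what changed: Replaces A's per-index inward two-pointer rescans by the Z-algorithm: one left-to-right pass with a z-box over needle+sep+reversed(needle) computes all lcp values, and each answer is read off with an arithmetic cap (i+1)//2.
import Mathlib
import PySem

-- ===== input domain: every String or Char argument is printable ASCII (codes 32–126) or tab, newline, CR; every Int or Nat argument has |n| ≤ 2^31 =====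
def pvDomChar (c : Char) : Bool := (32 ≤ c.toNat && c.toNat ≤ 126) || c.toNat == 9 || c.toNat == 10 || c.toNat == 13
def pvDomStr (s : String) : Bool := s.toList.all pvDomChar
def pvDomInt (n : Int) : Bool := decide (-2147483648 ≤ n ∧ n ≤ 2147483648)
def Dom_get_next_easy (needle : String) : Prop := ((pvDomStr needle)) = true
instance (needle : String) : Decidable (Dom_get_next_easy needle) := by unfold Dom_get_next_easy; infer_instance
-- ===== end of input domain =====

-- B replaces A's quadratic per-index two-pointer rescans by the Z-algorithm
-- (one z-box pass over needle+sep+reversed needle); faster asymptotically.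

-- ===== PORT A =====
-- the inner 'while left < right' loop of A; counts matching outer pairs, stops at first mismatch
def pvPairCount (s : List Char) (left right : Nat) : Nat :=
  if h : left < right then
    if s.getD left ' ' ≠ s.getD right ' ' then 0
    else pvPairCount s (left + 1) (right - 1) + 1
  else 0
termination_by right - left
decreasing_by omega

def get_next_easy (needle : String) : List Int :=
  let s := needle.toList
  (List.range s.length).map (fun i => (pvPairCount s 0 i : Int))

-- ===== PORT B =====
-- the 'while k + zk < m and s[zk] == s[k + zk]' loop of Source B
def pvZext (s : List Char) (k v : Nat) : Nat :=
  if h : k + v < s.length ∧ s.getD v ' ' = s.getD (k + v) ' ' then pvZext s k (v + 1)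
  else v
termination_by s.length - v
decreasing_by omega

-- the body of Source B's 'for k in range(1, m)' loop; state is (z, l, r)
def pvZstep (s : List Char) (st : List Nat × Nat × Nat) (k : Nat) : List Nat × Nat × Nat :=
  let z := st.1
  let l := st.2.1
  let r := st.2.2
  let zk0 := if k < r then min (r - k) (z.getD (k - l) 0) else 0
  let zk := pvZext s k zk0
  let z' := z.set k zk
  if k + zk > r then (z', k, k + zk) else (z', l, r)

def get_next_easy_alt (needle : String) : List Int :=
  let nl := needle.toList
  let n := nl.length
  let s := nl ++ [Char.ofNat 0] ++ nl.reverse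
  let m := s.length
  let st := (List.range' 1 (m - 1)).foldl (pvZstep s) (List.replicate m 0, 0, 0)
  (List.range n).map (fun i => ((min (st.1.getD (2 * n - i) 0) ((i + 1) / 2) : Nat) : Int))

-- ===== PRECONDITION & SPEC =====
def Spec_get_next_easy (needle : String) (out : List Int) : Prop := out = get_next_easy_alt needle
instance (needle : String) (out : List Int) : Decidable (Spec_get_next_easy needle out) := by unfold Spec_get_next_easy; infer_instance

-- ===== CLAIM (what is proved, stated in full; the proofs are below) =====
def Claim_equal_get_next_easy : Prop := ∀ (needle : String), Dom_get_next_easy needle → Spec_get_next_easy needle (get_next_easy needle)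

-- ===== LEMMAS AND PROOFS =====

-- longest common prefix length (specification device linking both ports)
def pvLcp : List Char → List Char → Nat
  | a :: as, b :: bs => if a = b then pvLcp as bs + 1 else 0
  | _, _ => 0

theorem pvLcp_le_right : ∀ (a b : List Char), pvLcp a b ≤ b.length := by
  intro a
  induction a with
  | nil => intro b; cases b <;> simp [pvLcp]
  | cons x as ih =>
    intro b
    cases b with
    | nil => simp [pvLcp]
    | cons y bs =>
      simp only [pvLcp]
      split_ifs
      · have := ih bs; simp; omega
      · simp

theorem pvLcp_getD : ∀ (a b : List Char) (j : Nat), j < pvLcp a b →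
    a.getD j ' ' = b.getD j ' ' := by
  intro a
  induction a with
  | nil => intro b j h; cases b <;> simp [pvLcp] at h
  | cons x as ih =>
    intro b j h
    cases b with
    | nil => simp [pvLcp] at h
    | cons y bs =>
      simp only [pvLcp] at h
      split_ifs at h with hxy
      · cases j with
        | zero => simpa using hxy
        | succ j' => simpa using ih bs j' (by omega)
      · omega

theorem pvLcp_mismatch : ∀ (a b : List Char), pvLcp a b < a.length → pvLcp a b < b.length →
    a.getD (pvLcp a b) ' ' ≠ b.getD (pvLcp a b) ' ' := by
  intro a
  induction a with
  | nil => intro b h _; simp at h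
  | cons x as ih =>
    intro b h1 h2
    cases b with
    | nil => simp at h2
    | cons y bs =>
      simp only [pvLcp] at *
      split_ifs at * with hxy
      · simpa using ih bs (by simpa using h1) (by simpa using h2)
      · simpa using hxy

theorem pvLcp_ge : ∀ (a b : List Char) (v : Nat), v ≤ a.length → v ≤ b.length →
    (∀ j, j < v → a.getD j ' ' = b.getD j ' ') → v ≤ pvLcp a b := by
  intro a
  induction a with
  | nil =>
    intro b v h _ _
    have hv0 : v = 0 := by simpa using h
    exact hv0 ▸ Nat.zero_le _
  | cons x as ih =>
    intro b v h1 h2 hch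
    cases v with
    | zero => omega
    | succ v' =>
      cases b with
      | nil => simp at h2
      | cons y bs =>
        have hxy : x = y := by simpa using hch 0 (by omega)
        simp only [pvLcp, if_pos hxy]
        have := ih bs v' (by simpa using h1) (by simpa using h2)
          (fun j hj => by simpa using hch (j + 1) (by omega))
        omega

theorem pvLcp_append : ∀ (a w x : List Char), w.length ≤ a.length →
    pvLcp (a ++ x) w = pvLcp a w := by
  intro a
  induction a with
  | nil =>
    intro w x h
    have hw : w = [] := by
      cases w with
      | nil => rfl
      | cons _ _ => simp at h
    subst hw
    cases x with
    | nil => rfl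
    | cons _ _ => simp [pvLcp]
  | cons c as ih =>
    intro w x h
    cases w with
    | nil => simp [pvLcp]
    | cons d ws =>
      simp only [List.cons_append, pvLcp]
      split_ifs
      · rw [ih ws x (by simpa using h)]
      · rfl

theorem getD_drop (s : List Char) (k j : Nat) (h : k + j < s.length) :
    (s.drop k).getD j ' ' = s.getD (k + j) ' ' := by
  have h1 : j < (s.drop k).length := by simp; omega
  rw [List.getD_eq_getElem _ _ h1, List.getD_eq_getElem _ _ h, List.getElem_drop]

theorem getD_default (s : List Nat) (j : Nat) (h : s.length ≤ j) : s.getD j 0 = 0 := by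
  simp [List.getD, List.getElem?_eq_none (by omega)]

theorem getD_set (z : List Nat) (i j v : Nat) (hi : i < z.length) :
    (z.set i v).getD j 0 = if j = i then v else z.getD j 0 := by
  rcases Nat.lt_or_ge j z.length with hj | hj
  · rw [List.getD_eq_getElem _ _ (by simpa using hj), List.getD_eq_getElem _ _ hj,
      List.getElem_set]
    split_ifs with h1 h2 <;> first | rfl | omega
  · rw [getD_default _ _ (by simpa using hj), getD_default _ _ hj, if_neg (by omega)]

theorem drop_append_own (a b : List Char) (n : Nat) :
    (a ++ b).drop (a.length + n) = b.drop n := by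
  induction a with
  | nil => simp
  | cons x xs ih => simp [Nat.succ_add, ih]

-- the naive extension loop, started at any v ≤ lcp, computes exactly the lcp
theorem pvZext_eq (s : List Char) (k : Nat) (hk : 1 ≤ k) :
    ∀ (d v : Nat), s.length - v = d → v ≤ pvLcp s (s.drop k) →
      pvZext s k v = pvLcp s (s.drop k) := by
  intro d
  induction d using Nat.strong_induction_on with
  | _ d ih =>
    intro v hd hv
    have hLr : pvLcp s (s.drop k) ≤ s.length - k := by
      have := pvLcp_le_right s (s.drop k); simp at this; omega
    rcases Nat.lt_or_ge v (pvLcp s (s.drop k)) with hlt | hge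
    · have hkv : k + v < s.length := by omega
      have hch : s.getD v ' ' = s.getD (k + v) ' ' := by
        have := pvLcp_getD s (s.drop k) v hlt
        rwa [getD_drop s k v hkv] at this
      rw [pvZext, dif_pos ⟨hkv, hch⟩]
      exact ih (s.length - (v + 1)) (by omega) (v + 1) rfl (by omega)
    · have hve : v = pvLcp s (s.drop k) := by omega
      subst hve
      rw [pvZext]
      apply dif_neg
      rintro ⟨hkv, hch⟩
      have h1 : pvLcp s (s.drop k) < s.length := by omega
      have h2 : pvLcp s (s.drop k) < (s.drop k).length := by simp; omega
      have hms := pvLcp_mismatch s (s.drop k) h1 h2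
      rw [getD_drop s k _ (by omega)] at hms
      exact hms hch

-- the fold invariant: processed entries of z hold the true lcp values
theorem zfold_inv (s : List Char) :
    ∀ (cnt k0 : Nat) (z : List Nat) (l r : Nat),
      1 ≤ k0 → k0 + cnt ≤ s.length →
      z.length = s.length →
      (∀ j, 1 ≤ j → j < k0 → z.getD j 0 = pvLcp s (s.drop j)) →
      (k0 < r → 1 ≤ l ∧ l < k0 ∧ r - l ≤ pvLcp s (s.drop l)) →
      ∀ j, 1 ≤ j → j < k0 + cnt →
        ((List.range' k0 cnt).foldl (pvZstep s) (z, l, r)).1.getD j 0 = pvLcp s (s.drop j) := by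
  intro cnt
  induction cnt with
  | zero =>
    intro k0 z l r hk0 hle hlen hz hbox j hj1 hj2
    simpa using hz j hj1 (by omega)
  | succ c ih =>
    intro k0 z l r hk0 hle hlen hz hbox j hj1 hj2
    rw [List.range'_succ, List.foldl_cons]
    have hk0len : k0 < s.length := by omega
    set zk0 := (if k0 < r then min (r - k0) (z.getD (k0 - l) 0) else 0) with hzk0
    have hrle : k0 < r → r ≤ s.length := by
      intro hkr
      obtain ⟨hl1, hlk, hrl⟩ := hbox hkr
      have := pvLcp_le_right s (s.drop l)
      simp at this
      omega
    have hzk0le : zk0 ≤ pvLcp s (s.drop k0) := by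
      rw [hzk0]
      split_ifs with hkr
      · obtain ⟨hl1, hlk, hrl⟩ := hbox hkr
        have hblk : z.getD (k0 - l) 0 = pvLcp s (s.drop (k0 - l)) :=
          hz (k0 - l) (by omega) (by omega)
        have hrs : r ≤ s.length := hrle hkr
        apply pvLcp_ge
        · omega
        · simp; omega
        · intro j' hj'
          rw [hblk] at hj'
          have hj2' : j' < pvLcp s (s.drop (k0 - l)) := by omega
          have e1 : s.getD j' ' ' = s.getD (k0 - l + j') ' ' := by
            have hlt : k0 - l + j' < s.length := by
              have := pvLcp_le_right s (s.drop (k0 - l)); simp at this; omega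
            have := pvLcp_getD s (s.drop (k0 - l)) j' hj2'
            rwa [getD_drop s (k0 - l) j' hlt] at this
          have e2 : s.getD (k0 - l + j') ' ' = s.getD (k0 + j') ' ' := by
            have ht : k0 - l + j' < pvLcp s (s.drop l) := by omega
            have hlt2 : l + (k0 - l + j') < s.length := by
              have := pvLcp_le_right s (s.drop l); simp at this; omega
            have hgd := pvLcp_getD s (s.drop l) (k0 - l + j') ht
            rw [getD_drop s l (k0 - l + j') hlt2] at hgd
            rw [hgd]
            congr 1
            omega
          rw [getD_drop s k0 j' (by omega), e1, e2]
      · omega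
    have hzk : pvZext s k0 zk0 = pvLcp s (s.drop k0) :=
      pvZext_eq s k0 hk0 (s.length - zk0) zk0 rfl hzk0le
    have hstep : pvZstep s (z, l, r) k0 =
        (z.set k0 (pvLcp s (s.drop k0)),
         if k0 + pvLcp s (s.drop k0) > r then (k0, k0 + pvLcp s (s.drop k0)) else (l, r)) := by
      simp only [pvZstep, ← hzk0, hzk]
      split_ifs <;> rfl
    rw [hstep]
    set L0 := pvLcp s (s.drop k0) with hL0
    have hzlen' : (z.set k0 L0).length = s.length := by simpa using hlen
    have hz' : ∀ j', 1 ≤ j' → j' < k0 + 1 → (z.set k0 L0).getD j' 0 = pvLcp s (s.drop j') := by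
      intro j' hj1' hj2'
      rw [getD_set z k0 j' L0 (by omega)]
      split_ifs with h
      · subst h; rfl
      · exact hz j' hj1' (by omega)
    by_cases hnew : k0 + L0 > r
    · rw [if_pos hnew]
      exact ih (k0 + 1) (z.set k0 L0) k0 (k0 + L0) (by omega) (by omega) hzlen' hz'
        (fun _ => ⟨by omega, by omega, by omega⟩) j hj1 (by omega)
    · rw [if_neg hnew]
      refine ih (k0 + 1) (z.set k0 L0) l r (by omega) (by omega) hzlen' hz'
        (fun h => ?_) j hj1 (by omega)
      obtain ⟨a1, a2, a3⟩ := hbox (by omega)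
      exact ⟨a1, by omega, a3⟩

-- A's pair-counting loop equals the capped lcp against the reversed string.
theorem pvPairCount_eq_min (s : List Char) :
    ∀ (d left right : Nat), right - left = d → right < s.length →
      pvPairCount s left right
        = min (pvLcp (s.drop left) (s.reverse.drop (s.length - 1 - right)))
              ((right - left + 1) / 2) := by
  intro d
  induction d using Nat.strong_induction_on with
  | _ d ih =>
    intro left right hd hr
    by_cases h : left < right
    · have hl : left < s.length := lt_trans h hr
      have hdropL : s.drop left = s[left] :: s.drop (left + 1) :=
        List.drop_eq_getElem_cons hl
      have hjr : s.length - 1 - right < s.reverse.length := by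
        simp only [List.length_reverse]; omega
      have hdropR : s.reverse.drop (s.length - 1 - right)
          = s.reverse[s.length - 1 - right] :: s.reverse.drop (s.length - 1 - right + 1) :=
        List.drop_eq_getElem_cons hjr
      have hrevget : s.reverse[s.length - 1 - right]'hjr = s[right] := by
        rw [List.getElem_reverse]
        congr 1
        omega
      rw [pvPairCount, dif_pos h, List.getD_eq_getElem s ' ' hl, List.getD_eq_getElem s ' ' hr,
        hdropL, hdropR, hrevget]
      by_cases hc : s[left] = s[right]
      · rw [if_neg (by simp [hc]), pvLcp, if_pos hc]
        have hrec := ih ((right - 1) - (left + 1)) (by omega) (left + 1) (right - 1) rfl (by omega)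
        have harg : s.length - 1 - (right - 1) = s.length - 1 - right + 1 := by omega
        rw [hrec, harg]
        omega
      · rw [if_pos (by simp [hc]), pvLcp, if_neg hc]
        omega
    · rw [pvPairCount, dif_neg h]
      omega

-- ===== VERDICT (by name: the statement is the Claim_ definition above) =====
theorem get_next_easy_spec : Claim_equal_get_next_easy := by
  intro needle _
  unfold Spec_get_next_easy get_next_easy get_next_easy_alt
  apply List.map_congr_left
  intro i hi
  rw [List.mem_range] at hi
  generalize hnl : needle.toList = nl at hi ⊢
  have hm : (nl ++ [Char.ofNat 0] ++ nl.reverse).length = 2 * nl.length + 1 := by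
    simp; omega
  have hfold := zfold_inv (nl ++ [Char.ofNat 0] ++ nl.reverse)
    ((nl ++ [Char.ofNat 0] ++ nl.reverse).length - 1) 1
    (List.replicate (nl ++ [Char.ofNat 0] ++ nl.reverse).length 0) 0 0
    (by omega) (by omega) (by simp) (by intro j h1 h2; omega) (by intro h; omega)
    (2 * nl.length - i) (by omega) (by omega)
  have hA := pvPairCount_eq_min nl i 0 i (by omega) hi
  rw [hA, hfold]
  have hdrop : (nl ++ [Char.ofNat 0] ++ nl.reverse).drop (2 * nl.length - i)
      = nl.reverse.drop (nl.length - 1 - i) := by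
    have harith : 2 * nl.length - i = (nl ++ [Char.ofNat 0]).length + (nl.length - 1 - i) := by
      simp; omega
    rw [List.append_assoc, ← List.append_assoc, harith, drop_append_own]
  rw [hdrop]
  have hlcp : pvLcp (nl ++ [Char.ofNat 0] ++ nl.reverse) (nl.reverse.drop (nl.length - 1 - i))
      = pvLcp nl (nl.reverse.drop (nl.length - 1 - i)) := by
    rw [List.append_assoc]
    apply pvLcp_append
    simp
  rw [hlcp]
  simp only [List.drop_zero, Nat.sub_zero]
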